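-- pv_equiv track=rewrite | github.com/Jome0169/Mendieta.C4_manuscript | python_scripts/marker_scripts/process_markers.annotate_v3.py | purge_lines
-- ===== SOURCE A (Python) =====
-- def purge_lines(line_to_process, tissue_type):
--     """TODO: Docstring for purge_lines.
--
--     :line_to_process: TODO
--     :exlusion_dict: TODO
--     :returns: TODO
--
--     """
--     exlusion_dict = {"leaf": ["inflorescence", "root", "pistil", "spikelet",
--         "atrichoblast", "trichoblast", "locule", "glume", "exodermis",
--         "lemma", "floral", "branch_meristem", "axillary_meristem"
--         "lodicule", "stamen", "endodermis", "pericycle"],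
--
--         "ear": ["root", "endodermis", "pericycle","pistil", "stamen", "leaf"],
--
--         "root": ["inflorescence", "pistil", "spikelet", "stamen", "leaf", "bundle_sheath",
--             "developing_pavement_cell",'L1']}
--
--     grab_correct_exclusion_dict = exlusion_dict[tissue_type]
--     take_base_name = line_to_process[-1]
--
--     if all(s not in take_base_name for s in grab_correct_exclusion_dict):
--         return(line_to_process)
--     else:
--         return(None)
-- ===== SOURCE B (Python) =====
-- def purge_lines(line_to_process, tissue_type):
--     """Position-major rewrite: walk the name once, at each position test whether
--     any excluded substring starts there, instead of one full scan per substring."""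
--     exlusion_dict = {"leaf": ["inflorescence", "root", "pistil", "spikelet",
--         "atrichoblast", "trichoblast", "locule", "glume", "exodermis",
--         "lemma", "floral", "branch_meristem", "axillary_meristem"
--         "lodicule", "stamen", "endodermis", "pericycle"],
--
--         "ear": ["root", "endodermis", "pericycle", "pistil", "stamen", "leaf"],
--
--         "root": ["inflorescence", "pistil", "spikelet", "stamen", "leaf", "bundle_sheath",
--             "developing_pavement_cell", 'L1']}
--
--     banned = exlusion_dict[tissue_type]
--     name = line_to_process[-1]
--     for i in range(len(name) + 1):
--         for s in banned:
--             if name.startswith(s, i):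
--                 return None
--     return line_to_process
-- ===== Notes on version B (the rewrite author's own statement) =====
-- stated objective: alternative
-- what changed: B replaces A's substring-major all(s not in name) membership scan by a single position-major walk over the name, testing at each start position whether any excluded entry begins there (startswith with an offset) and returning None at the first hit.
import Mathlib
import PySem

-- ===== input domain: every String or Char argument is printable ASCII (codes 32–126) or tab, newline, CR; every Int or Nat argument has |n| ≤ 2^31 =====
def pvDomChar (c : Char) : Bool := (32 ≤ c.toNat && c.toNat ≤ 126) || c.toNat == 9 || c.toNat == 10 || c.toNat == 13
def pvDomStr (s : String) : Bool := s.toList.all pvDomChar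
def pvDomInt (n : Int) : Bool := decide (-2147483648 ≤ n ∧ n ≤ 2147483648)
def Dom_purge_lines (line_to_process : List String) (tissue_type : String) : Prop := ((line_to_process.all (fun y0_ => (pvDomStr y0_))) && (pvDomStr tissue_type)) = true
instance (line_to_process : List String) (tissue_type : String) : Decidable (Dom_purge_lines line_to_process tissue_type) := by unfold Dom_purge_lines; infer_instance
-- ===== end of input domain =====

-- B walks the name position by position (one pass, first hit wins) instead of A's
-- one full membership scan per excluded substring; same return value everywhere A returns.

-- the exclusion dict literal shared by both Pythons (data, not algorithm; the
-- "axillary_meristem" "lodicule" adjacent-literal concatenation is reproduced exactly)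
def pvExclusionDict : PySem.Dict String (List String) :=
  PySem.Dict.ofList
    [("leaf", ["inflorescence", "root", "pistil", "spikelet",
        "atrichoblast", "trichoblast", "locule", "glume", "exodermis",
        "lemma", "floral", "branch_meristem", "axillary_meristemlodicule",
        "stamen", "endodermis", "pericycle"]),
     ("ear", ["root", "endodermis", "pericycle", "pistil", "stamen", "leaf"]),
     ("root", ["inflorescence", "pistil", "spikelet", "stamen", "leaf", "bundle_sheath",
        "developing_pavement_cell", "L1"])]

-- ===== PORT A =====
def purge_lines (line_to_process : List String) (tissue_type : String) : Option (List String) :=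
  match pvExclusionDict.get? tissue_type with
  | none => none      -- Python: KeyError (excluded by Pre_)
  | some grab_correct_exclusion_dict =>
    match PySem.List.pyGet? line_to_process (-1) with
    | none => none    -- Python: IndexError on empty list (excluded by Pre_)
    | some take_base_name =>
      if grab_correct_exclusion_dict.all (fun s => !(PySem.Str.isIn s take_base_name)) then
        some line_to_process
      else
        none

-- ===== PORT B =====
-- Source B's position loop: at each start position of the name, does some banned entry begin there?
def pvScan (banned : List String) : List Char → Bool
  | [] => banned.any (fun s => s.toList.isPrefixOf ([] : List Char))
  | c :: rest =>
      banned.any (fun s => s.toList.isPrefixOf (c :: rest)) || pvScan banned rest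

def purge_lines_alt (line_to_process : List String) (tissue_type : String) : Option (List String) :=
  match pvExclusionDict.get? tissue_type with
  | none => none      -- Python: KeyError (excluded by Pre_)
  | some banned =>
    match PySem.List.pyGet? line_to_process (-1) with
    | none => none    -- Python: IndexError on empty list (excluded by Pre_)
    | some name =>
      if pvScan banned name.toList then none else some line_to_process

-- ===== PRECONDITION & SPEC =====
-- Pre_ excludes exactly the inputs where Python A raises: a tissue_type not among the
-- three dict keys (KeyError) and an empty line_to_process (IndexError); B raises there too.
def Pre_purge_lines (line_to_process : List String) (tissue_type : String) : Prop :=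
  (tissue_type = "leaf" ∨ tissue_type = "ear" ∨ tissue_type = "root") ∧ line_to_process ≠ []

instance (line_to_process : List String) (tissue_type : String) : Decidable (Pre_purge_lines line_to_process tissue_type) := by unfold Pre_purge_lines; infer_instance

def pvWitness_purge_lines : List String × String := (["chr1", "100", "leaf_mesophyll"], "leaf")

def Spec_purge_lines (line_to_process : List String) (tissue_type : String) (out : Option (List String)) : Prop := out = purge_lines_alt line_to_process tissue_type
instance (line_to_process : List String) (tissue_type : String) (out : Option (List String)) : Decidable (Spec_purge_lines line_to_process tissue_type out) := by unfold Spec_purge_lines; infer_instance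

-- ===== CLAIM (what is proved, stated in full; the proofs are below) =====
def Claim_equal_purge_lines : Prop := ∀ (line_to_process : List String) (tissue_type : String), Dom_purge_lines line_to_process tissue_type → Pre_purge_lines line_to_process tissue_type → Spec_purge_lines line_to_process tissue_type (purge_lines line_to_process tissue_type)

-- ===== LEMMAS AND PROOFS =====

-- B's position-major scan finds a hit iff some banned entry is a prefix of some suffix
theorem pvScan_iff (banned : List String) (cs : List Char) :
    pvScan banned cs = true ↔ ∃ s ∈ banned, ∃ j, s.toList <+: cs.drop j := by
  induction cs with
  | nil =>
    simp only [pvScan, List.any_eq_true, List.drop_nil, List.isPrefixOf_iff_prefix]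
    constructor
    · rintro ⟨s, hs, hp⟩; exact ⟨s, hs, 0, hp⟩
    · rintro ⟨s, hs, _, hp⟩; exact ⟨s, hs, hp⟩
  | cons c rest ih =>
    simp only [pvScan, Bool.or_eq_true, List.any_eq_true, List.isPrefixOf_iff_prefix, ih]
    constructor
    · rintro (⟨s, hs, hp⟩ | ⟨s, hs, j, hp⟩)
      · exact ⟨s, hs, 0, by simpa using hp⟩
      · exact ⟨s, hs, j + 1, by simpa using hp⟩
    · rintro ⟨s, hs, j, hp⟩
      cases j with
      | zero => exact Or.inl ⟨s, hs, by simpa using hp⟩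
      | succ j => exact Or.inr ⟨s, hs, j, by simpa using hp⟩

-- hence pvScan is exactly "some banned entry occurs in the name"
theorem pvScan_eq_any (banned : List String) (name : String) :
    pvScan banned name.toList = banned.any (fun s => PySem.Str.isIn s name) := by
  rw [Bool.eq_iff_iff, pvScan_iff, List.any_eq_true]
  constructor
  · rintro ⟨s, hs, j, hp⟩
    exact ⟨s, hs, by
      have := (PySem.Chars.exists_prefix_drop_iff_isIn (sub := s.toList) (s := name.toList)).mp ⟨j, hp⟩
      simpa [PySem.Str.isIn_eq] using this⟩
  · rintro ⟨s, hs, h⟩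
    obtain ⟨j, hp⟩ := (PySem.Chars.exists_prefix_drop_iff_isIn (sub := s.toList) (s := name.toList)).mpr
      (by simpa [PySem.Str.isIn_eq] using h)
    exact ⟨s, hs, j, hp⟩

-- all(not p) = not any(p), for the final branch comparison
theorem pv_all_not_eq_not_any {α : Type} (l : List α) (p : α → Bool) :
    (l.all fun x => !p x) = !(l.any p) := by
  induction l with
  | nil => rfl
  | cons a t ih => simp [List.all_cons, List.any_cons, ih, Bool.not_or]

-- ===== VERDICT (by name: the statement is the Claim_ definition above) =====
theorem purge_lines_spec : Claim_equal_purge_lines := by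
  intro line tissue _ hpre
  obtain ⟨htt, hne⟩ := hpre
  unfold Spec_purge_lines purge_lines purge_lines_alt
  cases hd : pvExclusionDict.get? tissue with
  | none => -- impossible: Pre_ says tissue_type is one of the three keys
    rcases htt with h | h | h <;> subst h <;> exact absurd hd (by decide)
  | some banned =>
    cases hn : PySem.List.pyGet? line (-1) with
    | none => -- impossible: Pre_ says the list is nonempty, so [-1] is in range
      cases line with
      | nil => exact absurd rfl hne
      | cons a t =>
        simp [PySem.List.pyGet?, PySem.List.pyIdx?] at hn
    | some name =>
      simp only [pvScan_eq_any]
      rw [pv_all_not_eq_not_any]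
      cases banned.any (fun s => PySem.Str.isIn s name) <;> simp
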